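-- pv_equiv track=rewrite | github.com/Lemos2802/PL2023 | TPC3/tpc3.py | freqAno
-- ===== SOURCE A (Python) =====
-- def freqAno(lista):
-- 	datas = dict()
-- 	for dic in lista:
-- 		ano = dic["data"].split("-")[0]
-- 		if ano in datas.keys():
-- 			datas[ano] += 1
-- 		else:
-- 			datas[ano] = 1
--
-- 	return dict(sorted(datas.items(), key=lambda x:x[0]))
-- ===== SOURCE B (Python) =====
-- def freqAno(lista):
--     anos = sorted(dic["data"].split("-")[0] for dic in lista)
--     grupos = []
--     for a in anos:
--         if grupos and grupos[-1][0] == a: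
--             grupos[-1] = (a, grupos[-1][1] + 1)
--         else:
--             grupos.append((a, 1))
--     return dict(grupos)
-- ===== Notes on version B (the rewrite author's own statement) =====
-- stated objective: alternative
-- what changed: B replaces A's hash-count-then-sort-items (dict of counts, sorted at the end) with sort-first-then-run-length-encode: it sorts the extracted year strings and counts adjacent runs in one linear scan, so no counting dict and no final sort of items is needed. Pre_ excludes exactly the inputs where some entry lacks a 'data' key, on which A raises KeyError.
import Mathlib
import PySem

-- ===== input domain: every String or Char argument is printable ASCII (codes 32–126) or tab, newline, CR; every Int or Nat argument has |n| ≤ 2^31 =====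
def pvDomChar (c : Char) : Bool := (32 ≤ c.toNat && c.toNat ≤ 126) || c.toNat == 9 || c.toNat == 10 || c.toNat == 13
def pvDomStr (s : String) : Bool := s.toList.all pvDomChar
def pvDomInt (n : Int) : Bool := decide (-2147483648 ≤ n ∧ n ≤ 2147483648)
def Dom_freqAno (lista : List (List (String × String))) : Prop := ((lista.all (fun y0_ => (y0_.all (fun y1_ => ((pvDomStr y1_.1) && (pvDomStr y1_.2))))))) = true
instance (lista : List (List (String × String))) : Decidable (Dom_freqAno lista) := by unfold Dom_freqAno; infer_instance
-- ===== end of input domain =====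

-- B counts per-year frequencies by sorting the year strings and run-length-encoding adjacent
-- runs, instead of A's dict counting followed by a sort of the items; same return value on Pre_.

-- ===== PORT A =====
-- dic["data"].split("-")[0]: split? with a nonempty separator is always `some` and its result is
-- nonempty, so `[0]` is exactly its head; the `getD ""` for dic["data"] is only reached outside
-- Pre_freqAno (missing "data" key = Python KeyError).
def anoDe (dic : List (String × String)) : String :=
  (((PySem.Str.split? ((PySem.Dict.get? (PySem.Dict.mk dic) "data").getD "") "-").getD []).headD "")

-- dict(pairs): build a Python dict from key/value pairs (used by both Pythons' final dict(...))
def dictOf (ps : List (String × Int)) : List (String × Int) :=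
  (ps.foldl (fun d p => PySem.Dict.insert d p.1 p.2) PySem.Dict.empty).items

-- the loop body: if ano in datas.keys(): datas[ano] += 1 else: datas[ano] = 1
def stepA (d : PySem.Dict String Int) (dic : List (String × String)) : PySem.Dict String Int :=
  let ano := anoDe dic
  if PySem.Dict.contains d ano then PySem.Dict.insert d ano (((PySem.Dict.get? d ano).getD 0) + 1)
  else PySem.Dict.insert d ano 1

def freqAno (lista : List (List (String × String))) : List (String × Int) :=
  let datas := lista.foldl stepA PySem.Dict.empty
  dictOf (PySem.List.sorted (PySem.Dict.items datas) (fun x => x.1))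

-- ===== PORT B =====
-- loop body of B: merge `a` into the last run of `grupos` (grupos[-1]), or append a new run
def grupoStep (grupos : List (String × Int)) (a : String) : List (String × Int) :=
  match grupos.getLast? with
  | some (b, c) => if b == a then grupos.dropLast ++ [(a, c + 1)] else grupos ++ [(a, 1)]
  | none => [(a, 1)]

def freqAno_alt (lista : List (List (String × String))) : List (String × Int) :=
  let anos := PySem.List.sorted (lista.map anoDe) (fun a => a)
  dictOf (anos.foldl grupoStep [])

-- ===== PRECONDITION & SPEC =====
-- Pre_ excludes exactly the inputs where some entry has no "data" key: there Python A (and B) raise KeyError.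
def Pre_freqAno (lista : List (List (String × String))) : Prop :=
  (lista.all (fun dic => (PySem.Dict.get? (PySem.Dict.mk dic) "data").isSome)) = true
instance (lista : List (List (String × String))) : Decidable (Pre_freqAno lista) := by unfold Pre_freqAno; infer_instance
def pvWitness_freqAno : (List (List (String × String))) :=
  [[("data", "2020-01-02")], [("data", "1999-12-31"), ("x", "y")], [("data", "2020-03-04")]]

def Spec_freqAno (lista : List (List (String × String))) (out : List (String × Int)) : Prop := out = freqAno_alt lista
instance (lista : List (List (String × String))) (out : List (String × Int)) : Decidable (Spec_freqAno lista out) := by unfold Spec_freqAno; infer_instance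

-- ===== CLAIM (what is proved, stated in full; the proofs are below) =====
def Claim_equal_freqAno : Prop := ∀ (lista : List (List (String × String))), Dom_freqAno lista → Pre_freqAno lista → Spec_freqAno lista (freqAno lista)

-- ===== LEMMAS AND PROOFS =====

-- proof-side mirror of grupoStep working at the FRONT of the (reversed) run list
def grupoStepRev (grupos : List (String × Int)) (a : String) : List (String × Int) :=
  match grupos with
  | (b, c) :: t => if b == a then (a, c + 1) :: t else (a, 1) :: (b, c) :: t
  | [] => [(a, 1)]

lemma grupoStep_eq_rev (g : List (String × Int)) (a : String) :
    grupoStep g a = (grupoStepRev g.reverse a).reverse := by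
  cases hg : g.reverse with
  | nil =>
    have : g = [] := by simpa using congrArg List.reverse hg
    subst this; rfl
  | cons p t =>
    obtain ⟨b, c⟩ := p
    have hgeq : g = t.reverse ++ [(b, c)] := by
      have := congrArg List.reverse hg; simpa using this
    subst hgeq
    simp only [grupoStep, grupoStepRev]
    by_cases hba : b = a
    · subst hba; simp
    · have h1 : (b == a) = false := by simp [hba]
      simp [h1]

lemma foldl_grupoStep_eq_rev (zs : List String) :
    ∀ g : List (String × Int), zs.foldl grupoStep g = (zs.foldl grupoStepRev g.reverse).reverse := by
  induction zs with
  | nil => simp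
  | cons a rest ih =>
    intro g
    simp only [List.foldl_cons, grupoStep_eq_rev]
    rw [ih]
    simp

-- run-length encoding of a list (proof-side recursive characterisation of B's loop)
def rleRec : List String → List (String × Int)
  | [] => []
  | a :: rest =>
      (a, 1 + ((rest.takeWhile (fun x => x == a)).length : Int)) ::
        rleRec (rest.dropWhile (fun x => x == a))
termination_by zs => zs.length
decreasing_by
  exact Nat.lt_succ_of_le (List.length_dropWhile_le _ _)

lemma get?_eq_none_of_not_contains {κ ν : Type} [BEq κ] (d : PySem.Dict κ ν) (k : κ)
    (h : PySem.Dict.contains d k = false) : PySem.Dict.get? d k = none := by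
  simp only [PySem.Dict.contains, List.any_eq_false] at h
  simp only [PySem.Dict.get?, Option.map_eq_none_iff, List.find?_eq_none]
  exact h

lemma stepA_eq_counter (d : PySem.Dict String Int) (dic : List (String × String)) :
    stepA d dic = PySem.Dict.modify d (anoDe dic) 0 (· + 1) := by
  unfold stepA PySem.Dict.modify PySem.Dict.getD
  by_cases h : PySem.Dict.contains d (anoDe dic)
  · simp [h]
  · simp at h
    simp [h, get?_eq_none_of_not_contains d _ h]

lemma foldA_eq_counter (lista : List (List (String × String))) :
    lista.foldl stepA PySem.Dict.empty = PySem.Dict.counter (lista.map anoDe) := by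
  unfold PySem.Dict.counter
  rw [List.foldl_map]
  congr 1
  funext d dic
  exact stepA_eq_counter d dic

lemma foldl_grupoStepRev_run (zs : List String) (b : String) (t : List (String × Int)) :
    ∀ c : Int, zs.foldl grupoStepRev ((b, c) :: t) =
      (zs.dropWhile (fun x => x == b)).foldl grupoStepRev
        ((b, c + ((zs.takeWhile (fun x => x == b)).length : Int)) :: t) := by
  induction zs with
  | nil => simp
  | cons x rest ih =>
    intro c
    by_cases hx : x = b
    · subst hx
      simp only [List.foldl_cons, grupoStepRev, BEq.rfl, if_true, List.takeWhile_cons,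
        List.dropWhile_cons]
      rw [ih (c + 1)]
      simp [List.length_cons]
      ring_nf
    · have hbx : (b == x) = false := by simp [Ne.symm hx]
      have hxb : (x == b) = false := by simp [hx]
      simp only [List.foldl_cons, grupoStepRev, hbx, List.takeWhile_cons,
        List.dropWhile_cons, hxb]
      simp [List.foldl_cons, grupoStepRev, hbx]

lemma foldl_grupoStepRev_eq_rleRec (zs : List String) :
    ∀ acc : List (String × Int),
      (∀ b c t, acc = (b, c) :: t → ∀ x ∈ zs.head?, b ≠ x) →
      zs.foldl grupoStepRev acc = (rleRec zs).reverse ++ acc := by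
  induction zs using rleRec.induct with
  | case1 => simp [rleRec]
  | case2 a rest ih =>
    intro acc hacc
    have hstep : grupoStepRev acc a = (a, 1) :: acc := by
      match acc with
      | [] => rfl
      | (b, c) :: t =>
        have : b ≠ a := hacc b c t rfl a (by simp)
        simp [grupoStepRev, this]
    simp only [List.foldl_cons, hstep]
    rw [foldl_grupoStepRev_run]
    rw [ih ((a, 1 + ((rest.takeWhile (fun x => x == a)).length : Int)) :: acc) ?_]
    · rw [rleRec]
      simp
    · intro b c t heq x hx
      obtain ⟨hba, -⟩ := List.cons_eq_cons.mp heq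
      obtain ⟨rfl, -⟩ := Prod.mk.injEq .. ▸ (Prod.mk.inj hba)
      have h2 := List.head?_dropWhile_not (fun x => x == a) rest
      simp only [Option.mem_def] at hx
      rw [hx] at h2
      simp only [beq_eq_false_iff_ne] at h2
      intro hax
      exact h2 (hax ▸ rfl)

lemma lt_of_mem_dropWhile (a : String) (rest : List String) (hs : rest.Pairwise (· ≤ ·))
    (ha : ∀ x ∈ rest, a ≤ x) :
    ∀ x ∈ rest.dropWhile (fun x => x == a), a < x := by
  cases hdw : rest.dropWhile (fun x => x == a) with
  | nil => simp
  | cons w ws =>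
    have hw : (w == a) = false := by
      have h2 := List.head?_dropWhile_not (fun x => x == a) rest
      rw [hdw] at h2
      exact h2
    have hsub : (w :: ws).Sublist rest := hdw ▸ List.dropWhile_sublist _
    have hpw : (w :: ws).Pairwise (· ≤ ·) := hs.sublist hsub
    have haw : a < w := lt_of_le_of_ne (ha w (hsub.mem (by simp))) (by intro h; rw [← h] at hw; simp at hw)
    intro x hx
    rcases List.mem_cons.mp hx with rfl | hx
    · exact haw
    · exact lt_of_lt_of_le haw ((List.pairwise_cons.mp hpw).1 x hx)

lemma mem_takeWhile_eq (a : String) (rest : List String) :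
    ∀ x ∈ rest.takeWhile (fun x => x == a), x = a := by
  intro x hx
  have := List.mem_takeWhile_imp hx
  simpa using this

lemma rleRec_mem_keys (zs : List String) (k : String) :
    k ∈ (rleRec zs).map Prod.fst ↔ k ∈ zs := by
  induction zs using rleRec.induct with
  | case1 => simp [rleRec]
  | case2 a rest ih =>
    rw [rleRec]
    simp only [List.map_cons, List.mem_cons, ih]
    constructor
    · rintro (rfl | h)
      · exact Or.inl rfl
      · exact Or.inr ((List.dropWhile_sublist _).mem h)
    · rintro (rfl | h)
      · exact Or.inl rfl
      · have h2 : k ∈ rest.takeWhile (fun x => x == a) ++ rest.dropWhile (fun x => x == a) := by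
          rwa [List.takeWhile_append_dropWhile]
        rcases List.mem_append.mp h2 with h3 | h3
        · exact Or.inl (mem_takeWhile_eq a rest k h3)
        · exact Or.inr h3

lemma count_head_sorted (a : String) (rest : List String) :
    (a :: rest).count a = 1 + (rest.takeWhile (fun x => x == a)).length
      + (rest.dropWhile (fun x => x == a)).count a := by
  have htw : (rest.takeWhile (fun x => x == a)).count a
      = (rest.takeWhile (fun x => x == a)).length := by
    rw [List.count_eq_length]
    intro b hb
    simpa [eq_comm] using mem_takeWhile_eq a rest b hb
  have hsplit : (rest.takeWhile (fun x => x == a) ++ rest.dropWhile (fun x => x == a)).count a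
      = (rest.takeWhile (fun x => x == a)).count a
        + (rest.dropWhile (fun x => x == a)).count a := List.count_append ..
  rw [List.takeWhile_append_dropWhile, htw] at hsplit
  rw [List.count_cons_self]
  omega

lemma rleRec_counts (zs : List String) (hs : zs.Pairwise (· ≤ ·)) :
    ∀ p ∈ rleRec zs, p.2 = (zs.count p.1 : Int) := by
  induction zs using rleRec.induct with
  | case1 => simp [rleRec]
  | case2 a rest ih =>
    have hrest := (List.pairwise_cons.mp hs).2
    have ha := (List.pairwise_cons.mp hs).1
    have hdw : (rest.dropWhile (fun x => x == a)).Pairwise (· ≤ ·) :=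
      hrest.sublist (List.dropWhile_sublist _)
    have hlt := lt_of_mem_dropWhile a rest hrest ha
    rw [rleRec]
    intro p hp0
    rcases List.mem_cons.mp hp0 with rfl | hp
    · have hnot : (rest.dropWhile (fun x => x == a)).count a = 0 :=
        List.count_eq_zero.mpr (fun h => lt_irrefl a (hlt a h))
      have hc := count_head_sorted a rest
      rw [hc, hnot]
      push_cast
      ring
    · have hpk : p.1 ∈ rest.dropWhile (fun x => x == a) :=
        (rleRec_mem_keys _ p.1).mp (List.mem_map_of_mem hp)
      have hka : a < p.1 := hlt _ hpk
      rw [ih hdw p hp]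
      congr 1
      rw [List.count_cons, ← List.takeWhile_append_dropWhile (p := fun x => x == a) (l := rest),
        List.count_append]
      have h1 : (rest.takeWhile (fun x => x == a)).count p.1 = 0 :=
        List.count_eq_zero.mpr (fun h => absurd (mem_takeWhile_eq a rest _ h) (ne_of_gt hka))
      have h2 : (p.1 == a) = false := by simp [ne_of_gt hka]
      simp [h1, ne_of_lt hka]

lemma rleRec_pairwise (zs : List String) (hs : zs.Pairwise (· ≤ ·)) :
    (rleRec zs).Pairwise (fun p q => p.1 < q.1) := by
  induction zs using rleRec.induct with
  | case1 => simp [rleRec]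
  | case2 a rest ih =>
    have hrest := (List.pairwise_cons.mp hs).2
    have ha := (List.pairwise_cons.mp hs).1
    have hdw : (rest.dropWhile (fun x => x == a)).Pairwise (· ≤ ·) :=
      hrest.sublist (List.dropWhile_sublist _)
    have hlt := lt_of_mem_dropWhile a rest hrest ha
    rw [rleRec]
    refine List.pairwise_cons.mpr ⟨?_, ih hdw⟩
    intro q hq
    exact hlt q.1 ((rleRec_mem_keys _ q.1).mp (List.mem_map_of_mem hq))

lemma rleRec_perm_counter_items (ys : List String) :
    (rleRec (PySem.List.sorted ys (fun a => a))).Perm (PySem.Dict.counter ys).items := by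
  set zs := PySem.List.sorted ys (fun a => a) with hzs
  have hperm : zs.Perm ys := PySem.List.sorted_perm ys (fun a => a) false
  have hsorted : zs.Pairwise (· ≤ ·) := PySem.List.sorted_pairwise ys (fun a => a)
  have hself : rleRec zs = ((rleRec zs).map Prod.fst).map (fun k => (k, (ys.count k : Int))) := by
    rw [List.map_map]
    conv_lhs => rw [← List.map_id (rleRec zs)]
    apply List.map_congr_left
    intro p hp
    have h1 := rleRec_counts zs hsorted p hp
    have h2 : zs.count p.1 = ys.count p.1 := hperm.count_eq p.1
    simp only [id, Function.comp]
    rw [← h2, ← h1]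
  have hkeys : ((rleRec zs).map Prod.fst).Perm (PySem.Set.ofList ys) := by
    rw [List.perm_ext_iff_of_nodup ?_ (PySem.Set.nodup_ofList ys)]
    · intro k
      rw [rleRec_mem_keys, PySem.Set.mem_ofList, hperm.mem_iff]
    · exact List.pairwise_map.mpr ((rleRec_pairwise zs hsorted).imp ne_of_lt)
  rw [PySem.Dict.items_counter, hself]
  exact hkeys.map _

-- ===== VERDICT (by name: the statement is the Claim_ definition above) =====
theorem freqAno_spec : Claim_equal_freqAno := by
  unfold Claim_equal_freqAno Spec_freqAno
  intro lista _ _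
  show freqAno lista = freqAno_alt lista
  unfold freqAno freqAno_alt
  simp only []
  rw [foldA_eq_counter]
  have hb : (PySem.List.sorted (lista.map anoDe) (fun a => a)).foldl grupoStep []
      = rleRec (PySem.List.sorted (lista.map anoDe) (fun a => a)) := by
    rw [foldl_grupoStep_eq_rev]
    simp only [List.reverse_nil]
    rw [foldl_grupoStepRev_eq_rleRec _ [] (by intro b c t h; simp at h)]
    simp
  rw [hb]
  congr 1
  exact PySem.List.sorted_eq_of_perm_of_pairwise_lt _ _ _ (rleRec_perm_counter_items _)
    (rleRec_pairwise _ (PySem.List.sorted_pairwise _ _))
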